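-- pv_equiv track=rewrite | github.com/ArindamBanerji/gen-ai-roi-demo | backend/app/routers/graph.py | _consensus_severity
-- ===== SOURCE A (Python) =====
-- from typing import Any, Dict, List
--
-- def _consensus_severity(sources: Dict[str, Dict]) -> str:
--     """
--     Derive a single severity label from all source-specific values.
--
--     Priority order:
--       1. Any source "critical" or "malicious"  → "critical"
--       2. Any source "high"                     → "high"
--       3. All sources "low" or "benign"         → "low"
--       4. Otherwise                             → "medium"
--     """
--     all_values: List[str] = []
--     for data in sources.values():
--         raw = data.get("severity") or data.get("classification") or ""
--         if raw:
--             all_values.append(raw.lower())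
--
--     if not all_values:
--         return "unknown"
--     if any(v in ("critical", "malicious") for v in all_values):
--         return "critical"
--     if any(v == "high" for v in all_values):
--         return "high"
--     if all(v in ("low", "benign") for v in all_values):
--         return "low"
--     return "medium"
-- ===== SOURCE B (Python) =====
-- def _prio(v):
--     if v in ("critical", "malicious"):
--         return 4
--     if v == "high":
--         return 3
--     if v in ("low", "benign"):
--         return 1
--     return 2
--
--
-- def _label(best):
--     if best >= 4:
--         return "critical"
--     if best == 3:
--         return "high"
--     if best == 2:
--         return "medium"
--     if best == 1:
--         return "low"
--     return "unknown"
--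
--
-- def _consensus_severity(sources):
--     best = 0
--     for data in sources.values():
--         raw = data.get("severity") or data.get("classification") or ""
--         if raw:
--             best = max(best, _prio(raw.lower()))
--     return _label(best)
-- ===== Notes on version B (the rewrite author's own statement) =====
-- stated objective: alternative
-- what changed: Replaces the collected-values list and the three any/any/all scans by a single pass that max-reduces a numeric severity priority (critical/malicious=4, high=3, unrecognized=2, low/benign=1) and maps the maximum back to a label.
import Mathlib
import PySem

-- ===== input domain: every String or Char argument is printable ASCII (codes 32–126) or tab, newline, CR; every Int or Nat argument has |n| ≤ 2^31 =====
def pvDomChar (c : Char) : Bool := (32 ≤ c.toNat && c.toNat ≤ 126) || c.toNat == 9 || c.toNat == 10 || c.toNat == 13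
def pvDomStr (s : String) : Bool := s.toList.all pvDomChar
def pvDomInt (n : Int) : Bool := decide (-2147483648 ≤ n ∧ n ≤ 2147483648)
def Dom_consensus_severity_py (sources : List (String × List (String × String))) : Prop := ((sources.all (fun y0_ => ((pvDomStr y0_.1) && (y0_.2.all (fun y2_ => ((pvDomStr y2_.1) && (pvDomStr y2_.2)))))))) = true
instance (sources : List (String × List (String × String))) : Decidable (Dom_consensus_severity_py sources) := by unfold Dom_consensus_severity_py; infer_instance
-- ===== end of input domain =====

-- B replaces A's collected-values list and any/any/all cascade by a single max-reduction over a
-- numeric severity priority; same extraction of values, same results (alternative decomposition).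

-- ===== PORT A =====
-- shared extraction helper: Python's `data.get("severity") or data.get("classification") or ""`
-- (both Pythons contain this identical line); pvPyOrStr is `<Option> or <str>` truthiness
def pvPyOrStr (a : Option String) (b : String) : String :=
  match a with
  | some s => if s = "" then b else s
  | none => b

def pvRaw (data : List (String × String)) : String :=
  let d := PySem.Dict.ofList data
  pvPyOrStr (d.get? "severity") (pvPyOrStr (d.get? "classification") "")

def consensus_severity_py (sources : List (String × List (String × String))) : String :=
  let all_values : List String :=
    (PySem.Dict.ofList sources).values.foldl
      (fun acc data =>
        let raw := pvRaw data
        if raw ≠ "" then acc ++ [PySem.Str.lower raw] else acc) []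
  if all_values = [] then "unknown"
  else if all_values.any (fun v => v == "critical" || v == "malicious") then "critical"
  else if all_values.any (fun v => v == "high") then "high"
  else if all_values.all (fun v => v == "low" || v == "benign") then "low"
  else "medium"

-- ===== PORT B =====
def pvPrio (v : String) : Nat :=
  if v == "critical" || v == "malicious" then 4
  else if v == "high" then 3
  else if v == "low" || v == "benign" then 1
  else 2

def pvLabel (best : Nat) : String :=
  if best ≥ 4 then "critical"
  else if best = 3 then "high"
  else if best = 2 then "medium"
  else if best = 1 then "low"
  else "unknown"

def consensus_severity_py_alt (sources : List (String × List (String × String))) : String :=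
  pvLabel
    ((PySem.Dict.ofList sources).values.foldl
      (fun best data =>
        let raw := pvRaw data
        if raw ≠ "" then max best (pvPrio (PySem.Str.lower raw)) else best) 0)

-- ===== PRECONDITION & SPEC =====
def Spec_consensus_severity_py (sources : List (String × List (String × String))) (out : String) : Prop := out = consensus_severity_py_alt sources
instance (sources : List (String × List (String × String))) (out : String) : Decidable (Spec_consensus_severity_py sources out) := by unfold Spec_consensus_severity_py; infer_instance

-- ===== CLAIM (what is proved, stated in full; the proofs are below) =====
def Claim_equal_consensus_severity_py : Prop := ∀ (sources : List (String × List (String × String))), Dom_consensus_severity_py sources → Spec_consensus_severity_py sources (consensus_severity_py sources)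

-- ===== LEMMAS AND PROOFS =====

-- A's value-collecting loop, and the max over priorities of a value list
def pvVals (vs : List (List (String × String))) : List String :=
  vs.foldl (fun acc data =>
    let raw := pvRaw data
    if raw ≠ "" then acc ++ [PySem.Str.lower raw] else acc) []

def pvBest (vals : List String) : Nat :=
  vals.foldl (fun b v => max b (pvPrio v)) 0

theorem pvVals_acc (vs : List (List (String × String))) :
    ∀ acc : List String,
      vs.foldl (fun acc data =>
        let raw := pvRaw data
        if raw ≠ "" then acc ++ [PySem.Str.lower raw] else acc) acc = acc ++ pvVals vs := by
  induction vs with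
  | nil => intro acc; simp [pvVals]
  | cons d vs ih =>
      intro acc
      simp only [List.foldl_cons, pvVals]
      rw [ih, ih (if pvRaw d ≠ "" then [] ++ [PySem.Str.lower (pvRaw d)] else [])]
      split <;> simp

theorem pvBest_acc (vals : List String) :
    ∀ b : Nat, vals.foldl (fun b v => max b (pvPrio v)) b = max b (pvBest vals) := by
  induction vals with
  | nil => intro b; simp [pvBest]
  | cons v vals ih =>
      intro b
      simp only [List.foldl_cons, pvBest]
      rw [ih, ih (max 0 (pvPrio v))]
      omega

theorem pvBest_cons (v : String) (vals : List String) :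
    pvBest (v :: vals) = max (pvPrio v) (pvBest vals) := by
  have h : pvBest (v :: vals)
      = vals.foldl (fun b v => max b (pvPrio v)) (max 0 (pvPrio v)) := rfl
  rw [h, pvBest_acc]
  omega

-- B's fold over the sources equals the max-fold over A's collected values
theorem pvFoldB_eq (vs : List (List (String × String))) :
    ∀ b : Nat,
      vs.foldl (fun best data =>
        let raw := pvRaw data
        if raw ≠ "" then max best (pvPrio (PySem.Str.lower raw)) else best) b
      = (pvVals vs).foldl (fun b v => max b (pvPrio v)) b := by
  induction vs with
  | nil => intro b; simp [pvVals]
  | cons d vs ih =>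
      intro b
      simp only [List.foldl_cons, pvVals]
      rw [pvVals_acc, ih]
      by_cases h : pvRaw d = "" <;> simp [h]

theorem pvPrio_le_four (v : String) : pvPrio v ≤ 4 := by
  unfold pvPrio; split_ifs <;> omega

theorem pvPrio_pos (v : String) : 1 ≤ pvPrio v := by
  unfold pvPrio; split_ifs <;> omega

theorem pvBest_le (vals : List String) (k : Nat)
    (h : ∀ v ∈ vals, pvPrio v ≤ k) : pvBest vals ≤ k := by
  induction vals with
  | nil => simp [pvBest]
  | cons v vals ih =>
      rw [pvBest_cons]
      have := h v (by simp)
      have := ih (fun w hw => h w (by simp [hw]))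
      omega

theorem pvle_Best (vals : List String) (v : String) (hv : v ∈ vals) :
    pvPrio v ≤ pvBest vals := by
  induction vals with
  | nil => cases hv
  | cons w vals ih =>
      rw [pvBest_cons]
      rcases List.mem_cons.mp hv with h | h
      · subst h; exact Nat.le_max_left _ _
      · exact Nat.le_trans (ih h) (Nat.le_max_right _ _)

-- the core: A's cascade on a value list = label of the max priority
theorem pvCascade_eq_label (vals : List String) :
    (if vals = [] then "unknown"
     else if vals.any (fun v => v == "critical" || v == "malicious") then "critical"
     else if vals.any (fun v => v == "high") then "high"
     else if vals.all (fun v => v == "low" || v == "benign") then "low"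
     else "medium") = pvLabel (pvBest vals) := by
  by_cases h0 : vals = []
  · subst h0; simp [pvBest, pvLabel]
  · simp only [h0, if_false]
    by_cases hc : vals.any (fun v => v == "critical" || v == "malicious")
    · -- some critical/malicious value: best = 4
      obtain ⟨v, hv, hvc⟩ := List.any_eq_true.mp hc
      have h4 : pvPrio v = 4 := by simp [pvPrio, hvc]
      have hlo : 4 ≤ pvBest vals := h4 ▸ pvle_Best vals v hv
      have hhi : pvBest vals ≤ 4 := pvBest_le vals 4 (fun w _ => pvPrio_le_four w)
      have heq : pvBest vals = 4 := Nat.le_antisymm hhi hlo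
      simp [hc, heq, pvLabel]
    · have hcf : ∀ w ∈ vals, ((w == "critical" || w == "malicious") = false) := by
        simpa only [Bool.not_eq_true, List.any_eq_false] using hc
      have hle3 : pvBest vals ≤ 3 := by
        apply pvBest_le
        intro w hw
        simp [pvPrio, hcf w hw]
        split_ifs <;> omega
      by_cases hh : vals.any (fun v => v == "high")
      · obtain ⟨v, hv, hvh⟩ := List.any_eq_true.mp hh
        have h3 : pvPrio v = 3 := by simp [pvPrio, hcf v hv, hvh]
        have hlo : 3 ≤ pvBest vals := h3 ▸ pvle_Best vals v hv
        have heq : pvBest vals = 3 := Nat.le_antisymm hle3 hlo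
        simp [hc, hh, heq, pvLabel]
      · have hhf : ∀ w ∈ vals, ((w == "high") = false) := by
          simpa only [Bool.not_eq_true, List.any_eq_false] using hh
        have hle2 : pvBest vals ≤ 2 := by
          apply pvBest_le
          intro w hw
          simp [pvPrio, hcf w hw, hhf w hw]
          split_ifs <;> omega
        by_cases hl : vals.all (fun v => v == "low" || v == "benign")
        · have hle1 : pvBest vals ≤ 1 := by
            apply pvBest_le
            intro w hw
            have := List.all_eq_true.mp hl w hw
            simp [pvPrio, hcf w hw, hhf w hw, this]
          obtain ⟨v, hv⟩ := List.exists_mem_of_ne_nil vals h0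
          have hpos : 1 ≤ pvBest vals :=
            Nat.le_trans (pvPrio_pos v) (pvle_Best vals v hv)
          have heq : pvBest vals = 1 := Nat.le_antisymm hle1 hpos
          simp [hc, hh, hl, heq, pvLabel]
        · have hl' : vals.all (fun v => v == "low" || v == "benign") = false := by
            simpa only [Bool.not_eq_true] using hl
          obtain ⟨v, hv, hvl'⟩ := List.all_eq_false.mp hl'
          have hvl : ((v == "low" || v == "benign") = false) := by
            simpa only [Bool.not_eq_true] using hvl'
          have h2 : pvPrio v = 2 := by
            simp [pvPrio, hcf v hv, hhf v hv, hvl]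
          have hlo : 2 ≤ pvBest vals := h2 ▸ pvle_Best vals v hv
          have heq : pvBest vals = 2 := Nat.le_antisymm hle2 hlo
          simp [hc, hh, hl, heq, pvLabel]

-- ===== VERDICT (by name: the statement is the Claim_ definition above) =====
theorem consensus_severity_py_spec : Claim_equal_consensus_severity_py := by
  intro sources _
  unfold Spec_consensus_severity_py consensus_severity_py consensus_severity_py_alt
  rw [pvFoldB_eq]
  have hv : (PySem.Dict.ofList sources).values.foldl
      (fun acc data =>
        let raw := pvRaw data
        if raw ≠ "" then acc ++ [PySem.Str.lower raw] else acc) [] =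
      pvVals (PySem.Dict.ofList sources).values := rfl
  simp only [hv]
  rw [show ((pvVals (PySem.Dict.ofList sources).values).foldl (fun b v => max b (pvPrio v)) 0) = pvBest (pvVals (PySem.Dict.ofList sources).values) from rfl]
  exact pvCascade_eq_label _
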